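-- pv_equiv track=rewrite | github.com/ruc-datalab/SC-prompt | src/datasets/geoquery/geoquery.py | normalize_alias
-- ===== SOURCE A (Python) =====
-- from typing import List, Generator, Any, Dict, Tuple
--
-- def normalize_alias(
--     sql: str,
--     table_names: List[str],
-- ) -> str:
--     alias_format = 'T{count}'
--     count = 1
--     for tab in table_names+['DERIVED_FIELD', 'DERIVED_TABLE']:
--         tab = tab.upper()
--         for idx in ['0','1','2','3','4','5','6']:
--             old_alias = tab+'alias'+idx
--             if old_alias in sql:
--                 new_alias = alias_format.format(count=count)
--                 sql = sql.replace(old_alias, new_alias)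
--                 count += 1
--     return sql
-- ===== SOURCE B (Python) =====
-- from typing import List
--
-- def normalize_alias(
--     sql: str,
--     table_names: List[str],
-- ) -> str:
--     # Two phases: build the alias -> T{n} table first, then rewrite sql in a
--     # single left-to-right scan driven by that table.
--     mapping = {}
--     n = 1
--     for t in table_names + ['DERIVED_FIELD', 'DERIVED_TABLE']:
--         for d in '0123456':
--             k = t.upper() + 'alias' + d
--             if k not in mapping and k in sql:
--                 mapping[k] = 'T%d' % n
--                 n += 1
--     out = []
--     i = 0
--     while i < len(sql):
--         for k, v in mapping.items():
--             if sql.startswith(k, i):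
--                 out.append(v)
--                 i += len(k)
--                 break
--         else:
--             out.append(sql[i])
--             i += 1
--     return ''.join(out)
-- ===== Notes on version B (the rewrite author's own statement) =====
-- stated objective: alternative
-- what changed: Replaces A's per-key sequential full-string replace passes with two phases: first build an ordered alias->T{n} mapping by membership tests on the original sql, then rewrite sql in one left-to-right scan that substitutes every mapped alias simultaneously.
-- outside the precondition, e.g. on normalize_alias('ABalias0', ['B', 'AB']): A returns 'AT1', B returns 'T2'; on normalize_alias('Aalias0Xalias1 Yalias0', ['A', '0X', 'Y']): A returns 'T1Xalias1 T2', B returns 'T1Xalias1 T3'; on normalize_alias('ZXalias0alias3', ['X', 'ZT1']): A returns 'T2', B returns 'ZT1alias3'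
import Mathlib
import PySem

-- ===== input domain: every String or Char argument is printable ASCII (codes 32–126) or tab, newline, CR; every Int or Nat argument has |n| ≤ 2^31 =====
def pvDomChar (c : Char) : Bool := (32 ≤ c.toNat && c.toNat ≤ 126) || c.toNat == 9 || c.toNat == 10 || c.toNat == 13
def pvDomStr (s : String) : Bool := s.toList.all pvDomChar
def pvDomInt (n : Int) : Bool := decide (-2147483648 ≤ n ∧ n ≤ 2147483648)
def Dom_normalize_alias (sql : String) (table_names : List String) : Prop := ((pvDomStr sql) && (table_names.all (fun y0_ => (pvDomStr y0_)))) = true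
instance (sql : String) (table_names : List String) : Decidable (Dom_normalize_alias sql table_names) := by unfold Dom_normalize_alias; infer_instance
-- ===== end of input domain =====

-- B replaces A's per-key sequential full-string replace passes by two phases: it first
-- builds the ordered alias -> T{n} mapping from the original sql, then rewrites sql in a
-- single left-to-right scan substituting all mapped aliases at once (objective: alternative).

-- ===== PORT A =====
def normalize_alias (sql : String) (table_names : List String) : String :=
  ((table_names ++ ["DERIVED_FIELD", "DERIVED_TABLE"]).foldl
    (fun (st : String × Int) tab0 =>
      let tab := PySem.Str.upper tab0
      (["0", "1", "2", "3", "4", "5", "6"]).foldl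
        (fun (st : String × Int) idx =>
          let old_alias := tab ++ "alias" ++ idx
          if PySem.Str.isIn old_alias st.1 then
            (PySem.Str.replace st.1 old_alias ("T" ++ PySem.Int.toStr st.2), st.2 + 1)
          else st)
        st)
    (sql, 1)).1

-- ===== PORT B =====
-- Source B's rewrite loop (while i < len(sql): try each mapped alias at position i, else copy
-- one character); the `!kv.1.isEmpty` conjunct is only a totality guard (keys always
-- contain "alias", so they are never empty).
def pvScan (m : List (List Char × List Char)) : List Char → List Char
  | [] => []
  | c :: t =>
    match List.find? (fun kv => !kv.1.isEmpty && kv.1.isPrefixOf (c :: t)) m with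
    | some kv => kv.2 ++ pvScan m (t.drop (kv.1.length - 1))
    | none => c :: pvScan m t
termination_by s => s.length
decreasing_by
  · simp only [List.length_cons, List.length_drop]; omega
  · simp only [List.length_cons]; omega

def normalize_alias_alt (sql : String) (table_names : List String) : String :=
  -- phase 1: the ordered alias -> 'T{n}' mapping, membership tested on the original sql
  let mapping := ((table_names ++ ["DERIVED_FIELD", "DERIVED_TABLE"]).flatMap
      (fun t => ("0123456".toList).map
        (fun d => (PySem.Str.upper t).toList ++ "alias".toList ++ [d]))).foldl
    (fun (st : List (List Char × List Char) × Int) k =>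
      if ((st.1.lookup k).isNone && PySem.Chars.isIn k sql.toList) then
        (st.1 ++ [(k, 'T' :: PySem.Int.toChars st.2)], st.2 + 1)
      else st) ([], 1)
  -- phase 2: one left-to-right scan substituting every mapped alias
  String.ofList (pvScan mapping.1 sql.toList)

-- ===== PRECONDITION & SPEC =====
-- A generated alias key is harmless when it does not begin with a digit, never has 'T'
-- directly before a digit, and no (proper, nonempty) suffix of one key is a prefix of
-- another (nor one key a substring of a different key).
def pvGoodKey (k : List Char) : Bool :=
  !k.isEmpty &&
  (k.head?.all fun c => !c.isDigit) &&
  (k.getLast?.all fun c => c != 'T') &&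
  ((k.zip k.tail).all fun p => !(p.1 == 'T' && p.2.isDigit))

def pvSepKeys (a b : List Char) : Bool :=
  (a.tails.all fun r => r.isEmpty || r == a || !r.isPrefixOf b) &&
  (a == b || !(PySem.Chars.isIn a b))

def pvPreKeys (table_names : List String) : List (List Char) :=
  (table_names ++ ["DERIVED_FIELD", "DERIVED_TABLE"]).flatMap
    (fun t => ("0123456".toList).map
      (fun d => (PySem.Str.upper t).toList ++ "alias".toList ++ [d]))

-- Pre_ excludes inputs on which A's sequential replaces can interfere with each other or
-- with the inserted 'T{n}' texts: a generated alias key whose uppercased table part starts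
-- with a digit or contains 'T' directly before a digit, or two keys occurring in sql of
-- which one is a substring of the other or overlaps it (a suffix of one a prefix of the
-- other); there A's order-dependent result is accidental, while B substitutes
-- simultaneously.
def Pre_normalize_alias (sql : String) (table_names : List String) : Prop :=
  ((pvPreKeys table_names).all (fun k => !(PySem.Chars.isIn k sql.toList))
    || ((pvPreKeys table_names).all pvGoodKey
      && (pvPreKeys table_names).all
          (fun a => !(PySem.Chars.isIn a sql.toList)
              || (pvPreKeys table_names).all
                  (fun b => !(PySem.Chars.isIn b sql.toList) || pvSepKeys a b)))) = true
instance (sql : String) (table_names : List String) : Decidable (Pre_normalize_alias sql table_names) := by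
  unfold Pre_normalize_alias; infer_instance

def pvWitness_normalize_alias : String × List String :=
  ("SELECT CITYalias0.name FROM city AS CITYalias0", ["city"])

def Spec_normalize_alias (sql : String) (table_names : List String) (out : String) : Prop := out = normalize_alias_alt sql table_names
instance (sql : String) (table_names : List String) (out : String) : Decidable (Spec_normalize_alias sql table_names out) := by unfold Spec_normalize_alias; infer_instance

-- ===== CLAIM (what is proved, stated in full; the proofs are below) =====
def Claim_equal_normalize_alias : Prop := ∀ (sql : String) (table_names : List String), Dom_normalize_alias sql table_names → Pre_normalize_alias sql table_names → Spec_normalize_alias sql table_names (normalize_alias sql table_names)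

-- ===== LEMMAS AND PROOFS =====

-- strong induction on the length of a char list
theorem pv_strongRec {P : List Char → Prop}
    (ih : ∀ s : List Char, (∀ t : List Char, t.length < s.length → P t) → P s) :
    ∀ s : List Char, P s := by
  intro s
  induction hn : s.length using Nat.strong_induction_on generalizing s with
  | _ n IH => exact ih s (fun t ht => IH t.length (by omega) t rfl)

-- the char-level form of one sequential replace of A (Python str.replace)
def pvCrep (k v : List Char) : List Char → List Char
  | [] => []
  | c :: t =>
    if k ≠ [] ∧ k.isPrefixOf (c :: t) then v ++ pvCrep k v (t.drop (k.length - 1))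
    else c :: pvCrep k v t
termination_by s => s.length
decreasing_by
  · simp only [List.length_cons, List.length_drop]; omega
  · simp only [List.length_cons]; omega

def pvGood (k : List Char) : Prop := pvGoodKey k = true
def pvSep (a b : List Char) : Prop := pvSepKeys a b = true
def pvGoodVal (v : List Char) : Prop :=
  ∃ ds, v = 'T' :: ds ∧ ds ≠ [] ∧ (∀ c ∈ ds, c.isDigit = true)

-- A's per-key step and B's mapping-building step, over char lists
def pvStepA (st : List Char × Int) (k : List Char) : List Char × Int :=
  if PySem.Chars.isIn k st.1 then (pvCrep k ('T' :: PySem.Int.toChars st.2) st.1, st.2 + 1) else st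

def pvStepB (sqlC : List Char) (st : List (List Char × List Char) × Int) (k : List Char) :
    List (List Char × List Char) × Int :=
  if ((st.1.lookup k).isNone && PySem.Chars.isIn k sqlC) then
    (st.1 ++ [(k, 'T' :: PySem.Int.toChars st.2)], st.2 + 1)
  else st

theorem pvGood_ne_nil {k : List Char} (h : pvGood k) : k ≠ [] := by
  unfold pvGood pvGoodKey at h
  simp only [Bool.and_eq_true, Bool.not_eq_true'] at h
  intro he; subst he; simp at h

theorem pvGood_head {k : List Char} (h : pvGood k) {c : Char} {t : List Char}
    (he : k = c :: t) : c.isDigit = false := by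
  subst he
  unfold pvGood pvGoodKey at h
  simp only [Bool.and_eq_true, Bool.not_eq_true'] at h
  simpa using h.1.1.2

theorem pvGood_last {k : List Char} (h : pvGood k) : ¬ (['T'] <:+ k) := by
  unfold pvGood pvGoodKey at h
  simp only [Bool.and_eq_true, Bool.not_eq_true'] at h
  rintro ⟨l, rfl⟩
  have := h.1.2
  simp [List.getLast?_append] at this

theorem pv_pair_mem : ∀ (l : List Char) (a b : Char) (r : List Char),
    (a, b) ∈ ((l ++ a :: b :: r).zip (l ++ a :: b :: r).tail) := by
  intro l
  induction l with
  | nil => intro a b r; simp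
  | cons c l ih =>
    intro a b r
    have h := ih a b r
    rcases hX : l ++ a :: b :: r with _ | ⟨x, X⟩
    · simp at hX
    · simp only [List.cons_append, hX, List.zip_cons_cons, List.tail_cons, List.mem_cons]
      right
      rw [hX] at h
      rcases hX2 : X with _ | ⟨y, Y⟩
      · rw [hX2] at h; simpa using h
      · rw [hX2] at h; simpa using h

theorem pvGood_TD {k : List Char} (h : pvGood k) {l r : List Char} {x : Char}
    (he : k = l ++ 'T' :: x :: r) : x.isDigit = false := by
  unfold pvGood pvGoodKey at h
  simp only [Bool.and_eq_true] at h
  have hz := h.2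
  rw [List.all_eq_true] at hz
  have hm : ('T', x) ∈ k.zip k.tail := by rw [he]; exact pv_pair_mem l 'T' x r
  have := hz _ hm
  simpa using this

theorem pvSep_not_infix {a b : List Char} (h : pvSep a b) (hne : a ≠ b) : ¬ a <:+: b := by
  unfold pvSep pvSepKeys at h
  simp only [Bool.and_eq_true, Bool.or_eq_true, beq_iff_eq, Bool.not_eq_true'] at h
  rcases h.2 with h2 | h2
  · exact absurd h2 hne
  · intro hin
    have := (PySem.Chars.isIn_iff_infix a b).mpr hin
    rw [h2] at this
    exact Bool.false_ne_true this

theorem pvSep_suffix {a b : List Char} (h : pvSep a b) {r : List Char}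
    (hr : r <:+ a) (hne : r ≠ []) (hprop : r ≠ a) : ¬ r <+: b := by
  unfold pvSep pvSepKeys at h
  simp only [Bool.and_eq_true] at h
  have h1 := h.1
  rw [List.all_eq_true] at h1
  have hm : r ∈ a.tails := by rw [List.mem_tails]; exact hr
  have := h1 _ hm
  simp only [Bool.or_eq_true, beq_iff_eq, List.isEmpty_iff, Bool.not_eq_true'] at this
  intro hp
  have hb : r.isPrefixOf b = true := List.isPrefixOf_iff_prefix.mpr hp
  simp [hne, hprop, hb] at this

theorem pv_same_pos {a b s : List Char} (ha : a <+: s) (hb : b <+: s)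
    (hab : pvSep a b) (hba : pvSep b a) : a = b := by
  by_contra hne
  rcases Nat.lt_or_ge b.length a.length with h | h
  · exact pvSep_not_infix hba (Ne.symm hne)
      ((List.prefix_of_prefix_length_le hb ha (by omega)).isInfix)
  · exact pvSep_not_infix hab hne ((List.prefix_of_prefix_length_le ha hb h).isInfix)

theorem pv_no_overlap {a b s : List Char} {j : Nat} (ha : a <+: s) (hb : b <+: s.drop j)
    (hj : 0 < j) (hjlt : j < a.length) (hab : pvSep a b) (hnin : ¬ b <:+: a) : False := by
  obtain ⟨s2, rfl⟩ := ha
  have hdrop : (a ++ s2).drop j = a.drop j ++ s2 := List.drop_append_of_le_length (by omega)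
  rw [hdrop] at hb
  have hsuff : a.drop j <:+ a := List.drop_suffix _ _
  have hlen : (a.drop j).length = a.length - j := List.length_drop ..
  rcases Nat.lt_or_ge (a.drop j).length b.length with h' | h'
  · have hr : a.drop j <+: b :=
      List.prefix_of_prefix_length_le (List.prefix_append _ _) hb (by omega)
    exact pvSep_suffix hab hsuff
      (by intro he; rw [he] at hlen; simp at hlen; omega)
      (by intro he; rw [he] at hlen; omega) hr
  · have hb' : b <+: a.drop j :=
      List.prefix_of_prefix_length_le hb (List.prefix_append _ _) h'
    exact hnin (List.infix_iff_prefix_suffix.mpr ⟨a.drop j, hb', hsuff⟩)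

-- equation lemmas
theorem pvCrep_nil (k v : List Char) : pvCrep k v [] = [] := by rw [pvCrep]

theorem pvCrep_cons_pos {k : List Char} (v : List Char) {c : Char} {t : List Char}
    (hk : k ≠ []) (hp : k.isPrefixOf (c :: t)) :
    pvCrep k v (c :: t) = v ++ pvCrep k v (t.drop (k.length - 1)) := by
  rw [pvCrep]; rw [if_pos ⟨hk, hp⟩]

theorem pvCrep_cons_neg {k : List Char} (v : List Char) {c : Char} {t : List Char}
    (hp : ¬ k.isPrefixOf (c :: t)) :
    pvCrep k v (c :: t) = c :: pvCrep k v t := by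
  rw [pvCrep]; rw [if_neg (by rintro ⟨-, h⟩; exact hp h)]

theorem pvScan_nil (m : List (List Char × List Char)) : pvScan m [] = [] := by rw [pvScan]

theorem pvScan_cons_pos {m : List (List Char × List Char)} {c : Char} {t : List Char}
    {kv : List Char × List Char}
    (h : List.find? (fun kv => !kv.1.isEmpty && kv.1.isPrefixOf (c :: t)) m = some kv) :
    pvScan m (c :: t) = kv.2 ++ pvScan m (t.drop (kv.1.length - 1)) := by
  rw [pvScan]; rw [h]

theorem pvScan_cons_neg {m : List (List Char × List Char)} {c : Char} {t : List Char}
    (h : List.find? (fun kv => !kv.1.isEmpty && kv.1.isPrefixOf (c :: t)) m = none) :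
    pvScan m (c :: t) = c :: pvScan m t := by
  rw [pvScan]; rw [h]

theorem pv_lookup_mem {m : List (List Char × List Char)} {k x : List Char}
    (h : m.lookup k = some x) : (k, x) ∈ m := by
  induction m with
  | nil => simp [List.lookup] at h
  | cons e m ih =>
    rcases e with ⟨a, b⟩
    simp only [List.lookup] at h
    cases hk : (k == a) with
    | true =>
      rw [hk] at h
      simp only [List.mem_cons]
      left
      have : k = a := by simpa using hk
      simp at h
      simp [this, h]
    | false =>
      rw [hk] at h
      exact List.mem_cons_of_mem _ (ih h)

theorem pv_lookup_append_isSome {m l : List (List Char × List Char)} {k : List Char}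
    (h : (m.lookup k).isSome) : (((m ++ l).lookup k)).isSome := by
  rw [List.lookup_append]
  rcases hm : m.lookup k with _ | v
  · rw [hm] at h; simp at h
  · simp [Option.or]

-- infix ↔ prefix-of-a-drop
theorem pv_infix_drop {p s : List Char} (h : p <:+: s) : ∃ j, p <+: s.drop j := by
  obtain ⟨t, hpt, hts⟩ := List.infix_iff_prefix_suffix.mp h
  obtain ⟨u, rfl⟩ := hts
  exact ⟨u.length, by simpa using hpt⟩

theorem pv_drop_infix {p s : List Char} {j : Nat} (h : p <+: s.drop j) : p <:+: s :=
  List.infix_iff_prefix_suffix.mpr ⟨s.drop j, h, List.drop_suffix _ _⟩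

theorem pv_suffix_tail {r p : List Char} {c : Char} (h : c :: r <:+ p) : r <:+ p := by
  obtain ⟨l, rfl⟩ := h; exact ⟨l ++ [c], by simp⟩

-- values 'T{n}' are inert: nonempty all-digit tails
theorem pv_toDigitsCore_ne_nil (b n : Nat) :
    ∀ fuel ds, Nat.toDigitsCore b fuel n ds = [] → ds = [] ∧ fuel = 0 := by
  intro fuel
  induction fuel generalizing n with
  | zero => intro ds h; exact ⟨h, rfl⟩
  | succ f ih =>
    intro ds h
    rw [Nat.toDigitsCore] at h
    by_cases hz : n / b = 0
    · simp only [hz, if_pos rfl] at h; simp at h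
    · rw [if_neg hz] at h
      have := ih _ _ h
      simp at this

theorem pv_digitChar_isDigit {n : Nat} (h : n < 10) : (Nat.digitChar n).isDigit = true := by
  interval_cases n <;> decide

theorem pv_toDigitsCore_digits :
    ∀ fuel (m : Nat) ds, (∀ c ∈ ds, c.isDigit = true) →
      ∀ c ∈ Nat.toDigitsCore 10 fuel m ds, c.isDigit = true := by
  intro fuel
  induction fuel with
  | zero => intro m ds hds; simpa [Nat.toDigitsCore] using hds
  | succ f ih =>
    intro m ds hds
    rw [Nat.toDigitsCore]
    have hd : ((m % 10).digitChar).isDigit = true :=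
      pv_digitChar_isDigit (Nat.mod_lt _ (by norm_num))
    by_cases hz : m / 10 = 0
    · simp only [hz, if_pos rfl]
      intro c hc
      rcases List.mem_cons.mp hc with h | h
      · simpa [h] using hd
      · exact hds c h
    · rw [if_neg hz]
      exact ih _ _ (by
        intro c hc
        rcases List.mem_cons.mp hc with h | h
        · simpa [h] using hd
        · exact hds c h)

theorem pv_goodVal_T {c : Int} (hc : 1 ≤ c) : pvGoodVal ('T' :: PySem.Int.toChars c) := by
  refine ⟨PySem.Int.toChars c, rfl, ?_, ?_⟩
  · unfold PySem.Int.toChars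
    rw [if_neg (by omega)]
    intro h
    rw [Nat.toDigits] at h
    have := pv_toDigitsCore_ne_nil 10 c.toNat _ _ h
    simp at this
  · unfold PySem.Int.toChars
    rw [if_neg (by omega)]
    exact pv_toDigitsCore_digits _ _ _ (by simp)

-- pvScan walks over all-digit text without substituting
theorem pv_scan_digits {M : List (List Char × List Char)}
    (hM : ∀ kv ∈ M, pvGood kv.1) :
    ∀ ds, (∀ c ∈ ds, c.isDigit = true) → ∀ Z, pvScan M (ds ++ Z) = ds ++ pvScan M Z := by
  intro ds
  induction ds with
  | nil => intro _ Z; simp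
  | cons d ds ih =>
    intro hds Z
    have hd : d.isDigit = true := hds d (by simp)
    have hnone : List.find? (fun kv => !kv.1.isEmpty && kv.1.isPrefixOf (d :: (ds ++ Z))) M = none := by
      rw [List.find?_eq_none]
      intro kv hkv
      simp only [Bool.and_eq_true, Bool.not_eq_true', List.isEmpty_iff, not_and]
      intro hne hp
      have hp' := List.isPrefixOf_iff_prefix.mp hp
      rcases hk : kv.1 with _ | ⟨c0, k'⟩
      · rw [hk] at hne; simp at hne
      · rw [hk] at hp'
        obtain ⟨u, hu⟩ := hp'
        have hc0 : c0 = d := by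
          have := congrArg (List.head? ·) hu
          simpa using this
        have := pvGood_head (hM kv hkv) hk
        rw [hc0] at this
        rw [this] at hd
        exact Bool.false_ne_true hd
    rw [List.cons_append, pvScan_cons_neg hnone, ih (fun c hc => hds c (by simp [hc])) Z]
    simp

theorem pv_scan_val {M : List (List Char × List Char)} {v : List Char}
    (hM : ∀ kv ∈ M, pvGood kv.1) (hv : pvGoodVal v) :
    ∀ Z, pvScan M (v ++ Z) = v ++ pvScan M Z := by
  obtain ⟨ds, rfl, hne, hds⟩ := hv
  intro Z
  have hnone : List.find? (fun kv => !kv.1.isEmpty && kv.1.isPrefixOf ('T' :: (ds ++ Z))) M = none := by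
    rw [List.find?_eq_none]
    intro kv hkv
    simp only [Bool.and_eq_true, Bool.not_eq_true', List.isEmpty_iff, not_and]
    intro hkne hp
    have hp' := List.isPrefixOf_iff_prefix.mp hp
    rcases hk : kv.1 with _ | ⟨c0, k'⟩
    · rw [hk] at hkne; simp at hkne
    · rw [hk] at hp'
      obtain ⟨u, hu⟩ := hp'
      have hc0 : c0 = 'T' := by
        have := congrArg (List.head? ·) hu
        simpa using this
      rcases hk' : k' with _ | ⟨c1, k''⟩
      · -- kv.1 = ['T'], a suffix of itself: contradicts pvGood_last
        have := pvGood_last (hM kv hkv)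
        rw [hk, hk', hc0] at this
        exact this ⟨[], rfl⟩
      · -- kv.1 starts 'T', then a digit from ds: contradicts pvGood_TD
        rcases ds with _ | ⟨d0, ds'⟩
        · exact absurd rfl hne
        · have hc1 : c1 = d0 := by
            rw [hk'] at hu
            simp only [List.cons_append, List.cons.injEq] at hu
            exact hu.2.1
          have := pvGood_TD (hM kv hkv) (l := []) (x := c1) (r := k'')
            (he := by rw [hk, hk', hc0]; rfl)
          rw [hc1] at this
          have hd0 := hds d0 (by simp)
          rw [this] at hd0
          exact Bool.false_ne_true hd0
  rw [List.cons_append, pvScan_cons_neg hnone]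
  rw [pv_scan_digits hM ds hds Z]
  simp

-- an occurrence of a good key cannot touch inserted 'T{n}' text
theorem pv_infix_digits {p : List Char} (hp : pvGood p) :
    ∀ ds, (∀ c ∈ ds, c.isDigit = true) → ∀ X, p <:+: ds ++ X → p <:+: X := by
  intro ds
  induction ds with
  | nil => intro _ X h; simpa using h
  | cons d ds ih =>
    intro hds X h
    rw [List.cons_append, List.infix_cons_iff] at h
    rcases h with h | h
    · obtain ⟨u, hu⟩ := h
      rcases hk : p with _ | ⟨c0, k'⟩
      · exact absurd hk (pvGood_ne_nil hp)
      · rw [hk] at hu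
        have hc0 : c0 = d := by
          have := congrArg (List.head? ·) hu
          simpa using this
        have := pvGood_head hp hk
        rw [hc0] at this
        have hd := hds d (by simp)
        rw [this] at hd
        exact absurd hd Bool.false_ne_true
    · exact ih (fun c hc => hds c (by simp [hc])) X h

theorem pv_infix_val {p v : List Char} (hp : pvGood p) (hv : pvGoodVal v) :
    ∀ X, p <:+: v ++ X → p <:+: X := by
  obtain ⟨ds, rfl, hne, hds⟩ := hv
  intro X h
  rw [List.cons_append, List.infix_cons_iff] at h
  rcases h with h | h
  · obtain ⟨u, hu⟩ := h
    rcases hk : p with _ | ⟨c0, k'⟩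
    · exact absurd hk (pvGood_ne_nil hp)
    · rw [hk] at hu
      have hc0 : c0 = 'T' := by
        have := congrArg (List.head? ·) hu
        simpa using this
      rcases hk' : k' with _ | ⟨c1, k''⟩
      · have := pvGood_last hp
        rw [hk, hk', hc0] at this
        exact absurd ⟨[], rfl⟩ this
      · rcases ds with _ | ⟨d0, ds'⟩
        · exact absurd rfl hne
        · have hc1 : c1 = d0 := by
            rw [hk'] at hu
            simp only [List.cons_append, List.cons.injEq] at hu
            exact hu.2.1
          have := pvGood_TD hp (l := []) (x := c1) (r := k'')
            (he := by rw [hk, hk', hc0]; rfl)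
          have hd0 := hds d0 (by simp)
          rw [← hc1, this] at hd0
          exact absurd hd0 Bool.false_ne_true
  · exact pv_infix_digits hp ds hds X h

theorem pvCrep_cons_if (k v : List Char) (c : Char) (t : List Char) :
    pvCrep k v (c :: t) =
      if k ≠ [] ∧ k.isPrefixOf (c :: t) then v ++ pvCrep k v (t.drop (k.length - 1))
      else c :: pvCrep k v t := by
  rw [pvCrep]

theorem pv_drop_shift {k : List Char} (hk : k ≠ []) (c : Char) (t : List Char) :
    t.drop (k.length - 1) = (c :: t).drop k.length := by
  rcases k with _ | ⟨a, k'⟩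
  · exact absurd rfl hk
  · simp

-- a nonempty suffix of a good key that matches inside pvCrep's output matches the input
theorem pv_prefix_reflect {k v p : List Char} (hp : pvGood p) (hv : pvGoodVal v) :
    ∀ s : List Char, ∀ r, r <:+ p → r ≠ [] → r <+: pvCrep k v s → r <+: s := by
  refine pv_strongRec (fun s ih => ?_)
  rcases s with _ | ⟨c, t⟩
  · intro r _ _ hpre
    rw [pvCrep_nil] at hpre
    exact hpre
  · intro r hrs hrne hpre
    rw [pvCrep_cons_if] at hpre
    by_cases hcp : k ≠ [] ∧ k.isPrefixOf (c :: t)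
    · rw [if_pos hcp] at hpre
      obtain ⟨ds, rfl, hdne, hds⟩ := hv
      exfalso
      obtain ⟨u, hu⟩ := hpre
      rcases hr : r with _ | ⟨c0, r'⟩
      · exact hrne hr
      · rw [hr] at hu
        have hc0 : c0 = 'T' := by
          simp only [List.cons_append, List.cons.injEq] at hu
          exact hu.1
        rcases hr' : r' with _ | ⟨c1, r''⟩
        · rw [hr, hr', hc0] at hrs
          exact pvGood_last hp hrs
        · rcases hdd : ds with _ | ⟨d0, ds'⟩
          · exact hdne hdd
          · have hc1 : c1 = d0 := by
              rw [hr', hdd] at hu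
              simp only [List.cons_append, List.cons.injEq] at hu
              exact hu.2.1
            obtain ⟨l, hl⟩ := hrs
            have := pvGood_TD hp (l := l) (x := c1) (r := r'')
              (he := by rw [← hl, hr, hr', hc0])
            have hd0 := hds d0 (by rw [hdd]; simp)
            rw [← hc1, this] at hd0
            exact Bool.false_ne_true hd0
    · rw [if_neg hcp] at hpre
      rcases hr : r with _ | ⟨c0, r'⟩
      · exact absurd hr hrne
      · subst hr
        rw [List.cons_prefix_cons] at hpre
        rcases hpre with ⟨hc0, hpre2⟩
        subst hc0
        rcases r' with _ | ⟨c1, r''⟩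
        · exact ⟨t, rfl⟩
        · have hr's : c1 :: r'' <:+ p := pv_suffix_tail hrs
          have := ih t (by simp) (c1 :: r'') hr's (by simp) hpre2
          rw [List.cons_prefix_cons]
          exact ⟨rfl, this⟩

theorem pv_crep_skip {k v : List Char} :
    ∀ n (s : List Char), n ≤ s.length → (∀ j, j < n → ¬ k <+: s.drop j) →
      pvCrep k v s = s.take n ++ pvCrep k v (s.drop n) := by
  intro n
  induction n with
  | zero => intro s _ _; simp
  | succ m ih =>
    intro s hlen hocc
    rcases s with _ | ⟨c, t⟩
    · simp at hlen
    · have h0 : ¬ k <+: (c :: t) := by simpa using hocc 0 (by omega)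
      rw [pvCrep_cons_if, if_neg (by rintro ⟨-, hpf⟩; exact h0 (List.isPrefixOf_iff_prefix.mp hpf))]
      rw [ih t (by simpa using hlen) (fun j hj => by simpa using hocc (j + 1) (by omega))]
      simp

theorem pv_prefix_preserve {k v p : List Char} (hpk : p ≠ k) (h1 : pvSep p k)
    (h2 : pvSep k p) :
    ∀ s : List Char, ∀ r, r <:+ p → r <+: s → r <+: pvCrep k v s := by
  refine pv_strongRec (fun s ih => ?_)
  intro r hrp hrs
  rcases hr : r with _ | ⟨x, r''⟩
  · exact List.nil_prefix
  · rcases s with _ | ⟨c, t⟩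
    · rw [hr] at hrs; simp at hrs
    · rw [pvCrep_cons_if]
      by_cases hcp : k ≠ [] ∧ k.isPrefixOf (c :: t)
      · exfalso
        have hkpre : k <+: (c :: t) := List.isPrefixOf_iff_prefix.mp hcp.2
        rcases Nat.lt_or_ge k.length r.length with hl | hl
        · -- k a prefix of r, r a suffix of p: k infix of p
          have hkr : k <+: r := List.prefix_of_prefix_length_le hkpre hrs (by omega)
          exact pvSep_not_infix h2 (Ne.symm hpk)
            (List.infix_iff_prefix_suffix.mpr ⟨r, hkr, hrp⟩)
        · have hrk : r <+: k := List.prefix_of_prefix_length_le hrs hkpre hl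
          by_cases hre : r = p
          · exact pvSep_not_infix h1 hpk (hre ▸ hrk).isInfix
          · exact pvSep_suffix h1 hrp (by rw [hr]; simp) hre hrk
      · rw [if_neg hcp]
        subst hr
        rw [List.cons_prefix_cons] at hrs
        rw [List.cons_prefix_cons]
        exact ⟨hrs.1, ih t (by simp) r'' (pv_suffix_tail hrp) hrs.2⟩

theorem pv_crep_infix_reflect {k v p : List Char} (hgp : pvGood p) (hv : pvGoodVal v) :
    ∀ s : List Char, p <:+: pvCrep k v s → p <:+: s := by
  refine pv_strongRec (fun s ih => ?_)
  intro hin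
  rcases s with _ | ⟨c, t⟩
  · rw [pvCrep_nil] at hin
    exact hin
  · rw [pvCrep_cons_if] at hin
    by_cases hcp : k ≠ [] ∧ k.isPrefixOf (c :: t)
    · rw [if_pos hcp] at hin
      have h1 : p <:+: pvCrep k v (t.drop (k.length - 1)) := pv_infix_val hgp hv _ hin
      have h2 := ih (t.drop (k.length - 1))
        (by simp only [List.length_cons, List.length_drop]; omega) h1
      exact List.infix_cons (h2.trans (List.drop_suffix _ _).isInfix)
    · rw [if_neg hcp] at hin
      rw [List.infix_cons_iff] at hin
      rcases hin with hin | hin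
      · have : p <+: pvCrep k v (c :: t) := by
          rw [pvCrep_cons_if, if_neg hcp]; exact hin
        exact (pv_prefix_reflect hgp hv (c :: t) p (List.suffix_refl p)
          (pvGood_ne_nil hgp) this).isInfix
      · exact List.infix_cons (ih t (by simp) hin)

theorem pv_crep_infix_preserve {k v p : List Char} (hgp : pvGood p) (hgk : pvGood k)
    (hpk : p ≠ k) (h1 : pvSep p k) (h2 : pvSep k p) :
    ∀ s : List Char, p <:+: s → p <:+: pvCrep k v s := by
  refine pv_strongRec (fun s ih => ?_)
  intro hin
  rcases s with _ | ⟨c, t⟩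
  · rw [pvCrep_nil]; exact hin
  · rw [pvCrep_cons_if]
    by_cases hcp : k ≠ [] ∧ k.isPrefixOf (c :: t)
    · rw [if_pos hcp]
      have hkpre : k <+: (c :: t) := List.isPrefixOf_iff_prefix.mp hcp.2
      obtain ⟨j, hpj⟩ := pv_infix_drop hin
      rcases Nat.lt_or_ge j k.length with hj | hj
      · rcases Nat.eq_zero_or_pos j with hj0 | hj0
        · rw [hj0] at hpj
          simp only [List.drop_zero] at hpj
          exact absurd (pv_same_pos hpj hkpre h1 h2) hpk
        · exact absurd (pv_no_overlap hkpre hpj hj0 hj h2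
            (pvSep_not_infix h1 hpk)) not_false
      · have : (c :: t).drop j = ((c :: t).drop k.length).drop (j - k.length) := by
          rw [List.drop_drop]
          congr 1
          omega
        rw [this] at hpj
        have hin' : p <:+: (c :: t).drop k.length := pv_drop_infix hpj
        rw [← pv_drop_shift hcp.1 c t] at hin'
        have := ih (t.drop (k.length - 1))
          (by simp only [List.length_cons, List.length_drop]; omega) hin'
        exact List.infix_append_of_infix_right this
    · rw [if_neg hcp]
      rw [List.infix_cons_iff] at hin
      rcases hin with hin | hin
      · have := pv_prefix_preserve (v := v) hpk h1 h2 (c :: t) p (List.suffix_refl p) hin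
        rw [pvCrep_cons_if, if_neg hcp] at this
        exact this.isInfix
      · exact List.infix_cons (ih t (by simp) hin)

theorem pv_crep_kill {k v : List Char} (hgk : pvGood k) (hv : pvGoodVal v)
    (hkk : pvSep k k) : ∀ s : List Char, ¬ k <:+: pvCrep k v s := by
  refine pv_strongRec (fun s ih => ?_)
  intro hin
  rcases s with _ | ⟨c, t⟩
  · rw [pvCrep_nil] at hin
    exact pvGood_ne_nil hgk (List.eq_nil_of_infix_nil hin)
  · rw [pvCrep_cons_if] at hin
    by_cases hcp : k ≠ [] ∧ k.isPrefixOf (c :: t)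
    · rw [if_pos hcp] at hin
      exact ih (t.drop (k.length - 1))
        (by simp only [List.length_cons, List.length_drop]; omega)
        (pv_infix_val hgk hv _ hin)
    · rw [if_neg hcp] at hin
      rw [List.infix_cons_iff] at hin
      rcases hin with hin | hin
      · have : k <+: pvCrep k v (c :: t) := by
          rw [pvCrep_cons_if, if_neg hcp]; exact hin
        have := pv_prefix_reflect hgk hv (c :: t) k (List.suffix_refl k)
          (pvGood_ne_nil hgk) this
        exact hcp ⟨pvGood_ne_nil hgk, List.isPrefixOf_iff_prefix.mpr this⟩
      · exact ih t (by simp) hin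

theorem pv_scan_absent {M : List (List Char × List Char)} :
    ∀ s : List Char, (∀ kv ∈ M, ¬ kv.1 <:+: s) → pvScan M s = s := by
  refine pv_strongRec (fun s ih => ?_)
  intro habs
  rcases s with _ | ⟨c, t⟩
  · exact pvScan_nil M
  · have hnone : List.find? (fun kv => !kv.1.isEmpty && kv.1.isPrefixOf (c :: t)) M = none := by
      rw [List.find?_eq_none]
      intro kv hkv
      simp only [Bool.and_eq_true, Bool.not_eq_true', not_and]
      intro _ hpf
      exact absurd (List.isPrefixOf_iff_prefix.mp hpf).isInfix (habs kv hkv)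
    rw [pvScan_cons_neg hnone]
    rw [ih t (by simp) (fun kv hkv hint => habs kv hkv (List.infix_cons hint))]

theorem pv_scan_erase {M₁ M₂ : List (List Char × List Char)} {e : List Char × List Char} :
    ∀ s : List Char, ¬ e.1 <:+: s → pvScan (M₁ ++ e :: M₂) s = pvScan (M₁ ++ M₂) s := by
  refine pv_strongRec (fun s ih => ?_)
  intro habs
  rcases s with _ | ⟨c, t⟩
  · rw [pvScan_nil, pvScan_nil]
  · have hpe : (fun kv : List Char × List Char =>
        !kv.1.isEmpty && kv.1.isPrefixOf (c :: t)) e = false := by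
      simp only [Bool.and_eq_false_iff]
      by_cases he : e.1.isEmpty
      · left; simp [he]
      · right
        rw [← Bool.not_eq_true]
        intro hpf
        exact habs (List.isPrefixOf_iff_prefix.mp hpf).isInfix
    have hfind : List.find? (fun kv => !kv.1.isEmpty && kv.1.isPrefixOf (c :: t)) (M₁ ++ e :: M₂)
        = List.find? (fun kv => !kv.1.isEmpty && kv.1.isPrefixOf (c :: t)) (M₁ ++ M₂) := by
      rw [List.find?_append, List.find?_append, List.find?_cons_of_neg (by simp [hpe])]
    rcases hF : List.find? (fun kv => !kv.1.isEmpty && kv.1.isPrefixOf (c :: t)) (M₁ ++ M₂)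
      with _ | kv
    · rw [pvScan_cons_neg (hfind.trans hF), pvScan_cons_neg hF]
      rw [ih t (by simp) (fun hint => habs (List.infix_cons hint))]
    · rw [pvScan_cons_pos (hfind.trans hF), pvScan_cons_pos hF]
      congr 1
      refine ih (t.drop (kv.1.length - 1)) (by simp only [List.length_cons, List.length_drop]; omega) ?_
      intro hint
      exact habs (List.infix_cons (hint.trans (List.drop_suffix _ _).isInfix))

theorem pv_scan_drop {M : List (List Char × List Char)} :
    ∀ (N : List (List Char × List Char)) (s : List Char),
      (∀ kv ∈ N, ¬ kv.1 <:+: s) → pvScan (N ++ M) s = pvScan M s := by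
  intro N
  induction N with
  | nil => intro s _; rfl
  | cons e N ih =>
    intro s habs
    have h1 : pvScan (([] : List (List Char × List Char)) ++ e :: (N ++ M)) s
        = pvScan ([] ++ (N ++ M)) s :=
      pv_scan_erase (M₁ := []) (M₂ := N ++ M) (e := e) s (habs e (by simp))
    simp only [List.nil_append] at h1
    rw [List.cons_append, h1]
    exact ih s (fun kv hkv => habs kv (by simp [hkv]))

-- the heart of the equivalence: one sequential replace commutes out of the simultaneous scan
theorem pvCore {k v : List Char} {M : List (List Char × List Char)}
    (hgk : pvGood k) (hv : pvGoodVal v)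
    (hM : ∀ kv ∈ M, pvGood kv.1 ∧ kv.1 ≠ k ∧ pvSep k kv.1 ∧ pvSep kv.1 k)
    (hMM : ∀ kv ∈ M, ∀ kv' ∈ M, pvSep kv.1 kv'.1) :
    ∀ s : List Char, pvScan ((k, v) :: M) s = pvScan M (pvCrep k v s) := by
  refine pv_strongRec (fun s ih => ?_)
  rcases s with _ | ⟨c, t⟩
  · rw [pvCrep_nil, pvScan_nil, pvScan_nil]
  · have hkne := pvGood_ne_nil hgk
    by_cases hk0 : k <+: (c :: t)
    · -- k matches at the head: both sides emit v
      have hkb : k.isPrefixOf (c :: t) = true := List.isPrefixOf_iff_prefix.mpr hk0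
      have hfind : List.find? (fun kv => !kv.1.isEmpty && kv.1.isPrefixOf (c :: t)) ((k, v) :: M)
          = some (k, v) := by
        rw [List.find?_cons_of_pos]
        simp [hkb, hkne]
      rw [pvScan_cons_pos hfind]
      rw [pvCrep_cons_pos v hkne hkb]
      rw [pv_scan_val (fun kv hkv => (hM kv hkv).1) hv]
      congr 1
      exact ih (t.drop (k.length - 1)) (by simp only [List.length_cons, List.length_drop]; omega)
    · have hnk : ¬ k <+: (c :: t) := hk0
      have hkb : k.isPrefixOf (c :: t) = false := by
        cases hh : k.isPrefixOf (c :: t) with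
        | true => exact absurd (List.isPrefixOf_iff_prefix.mp hh) hk0
        | false => rfl
      have hfk : (fun kv : List Char × List Char =>
          !kv.1.isEmpty && kv.1.isPrefixOf (c :: t)) (k, v) = false := by
        simp only [Bool.and_eq_false_iff]
        right; exact hkb
      rcases hF : List.find? (fun kv => !kv.1.isEmpty && kv.1.isPrefixOf (c :: t)) M with _ | kv'
      · -- nothing matches at the head
        have hfind : List.find? (fun kv => !kv.1.isEmpty && kv.1.isPrefixOf (c :: t)) ((k, v) :: M)
            = none := by
          rw [List.find?_cons_of_neg (by simp [hfk]), hF]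
        rw [pvScan_cons_neg hfind]
        rw [pvCrep_cons_neg v (by simp [hkb])]
        have hnone2 : List.find? (fun kv => !kv.1.isEmpty && kv.1.isPrefixOf (c :: pvCrep k v t)) M
            = none := by
          rw [List.find?_eq_none]
          intro kv hkv
          simp only [Bool.and_eq_true, Bool.not_eq_true', not_and]
          intro hkvne hpf
          have hcrep : c :: pvCrep k v t = pvCrep k v (c :: t) := (pvCrep_cons_neg v (by simp [hkb])).symm
          have hpre : kv.1 <+: pvCrep k v (c :: t) := by
            rw [← hcrep]; exact List.isPrefixOf_iff_prefix.mp hpf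
          have hpre2 := pv_prefix_reflect (hM kv hkv).1 hv (c :: t) kv.1
            (List.suffix_refl _) (pvGood_ne_nil (hM kv hkv).1) hpre
          have hmm := List.find?_eq_none.mp hF kv hkv
          simp only [Bool.and_eq_true, Bool.not_eq_true', not_and] at hmm
          have hfalse := hmm (by simpa using pvGood_ne_nil (hM kv hkv).1)
          exact absurd hpre2 (by simpa using hfalse)
        rw [pvScan_cons_neg hnone2]
        rw [ih t (by simp)]
      · -- M's first match kv' fires on both sides
        obtain ⟨hpred, M₁, M₂, hMsplit, hM₁⟩ := List.find?_eq_some_iff_append.mp hF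
        simp only [Bool.and_eq_true, Bool.not_eq_true', List.isEmpty_eq_false_iff] at hpred
        have hkv'ne : kv'.1 ≠ [] := hpred.1
        have hkv'pre : kv'.1 <+: (c :: t) := List.isPrefixOf_iff_prefix.mp hpred.2
        have hkv'M : kv' ∈ M := by rw [hMsplit]; simp
        have hfind : List.find? (fun kv => !kv.1.isEmpty && kv.1.isPrefixOf (c :: t)) ((k, v) :: M)
            = some kv' := by
          rw [List.find?_cons_of_neg (by simp [hfk]), hF]
        rw [pvScan_cons_pos hfind]
        have hlen : kv'.1.length ≤ (c :: t).length := hkv'pre.length_le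
        -- the first |kv'.1| characters are untouched by pvCrep
        have hskip : pvCrep k v (c :: t)
            = kv'.1 ++ pvCrep k v (t.drop (kv'.1.length - 1)) := by
          have hocc : ∀ j, j < kv'.1.length → ¬ k <+: (c :: t).drop j := by
            intro j hj hkpre
            rcases Nat.eq_zero_or_pos j with hj0 | hj0
            · rw [hj0] at hkpre; exact hnk (by simpa using hkpre)
            · exact pv_no_overlap hkv'pre hkpre hj0 hj ((hM kv' hkv'M).2.2.2)
                (pvSep_not_infix ((hM kv' hkv'M).2.2.1) (Ne.symm (hM kv' hkv'M).2.1))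
          have h1 := pv_crep_skip (k := k) (v := v) kv'.1.length (c :: t) hlen hocc
          rw [h1, ← List.prefix_iff_eq_take.mp hkv'pre, ← pv_drop_shift hkv'ne c t]
        rw [hskip]
        have hscan2 : pvScan M (kv'.1 ++ pvCrep k v (t.drop (kv'.1.length - 1)))
            = kv'.2 ++ pvScan M (pvCrep k v (t.drop (kv'.1.length - 1))) := by
          obtain ⟨x, xs, hkv1⟩ : ∃ x xs, kv'.1 = x :: xs := by
            rcases hkk1 : kv'.1 with _ | ⟨x, xs⟩
            · exact absurd hkk1 hkv'ne
            · exact ⟨x, xs, rfl⟩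
          have hZdef : kv'.1 ++ pvCrep k v (t.drop (kv'.1.length - 1))
              = x :: (xs ++ pvCrep k v (t.drop (kv'.1.length - 1))) := by
            rw [hkv1]; simp
          rw [hZdef]
          have hfind2 : List.find? (fun kv => !kv.1.isEmpty &&
              kv.1.isPrefixOf (x :: (xs ++ pvCrep k v (t.drop (kv'.1.length - 1))))) M
              = some kv' := by
            rw [List.find?_eq_some_iff_append]
            refine ⟨?_, M₁, M₂, hMsplit, ?_⟩
            · simp only [Bool.and_eq_true, Bool.not_eq_true', List.isEmpty_eq_false_iff]
              refine ⟨hkv'ne, ?_⟩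
              rw [List.isPrefixOf_iff_prefix, ← hZdef]
              exact List.prefix_append _ _
            · intro a ha
              simp only [Bool.not_eq_eq_eq_not, Bool.not_true, Bool.and_eq_false_iff]
              by_cases hane : a.1.isEmpty
              · left; simp [hane]
              · right
                rw [← Bool.not_eq_true]
                intro hapf
                have hane' : a.1 ≠ [] := by simpa using hane
                have hapre : a.1 <+: kv'.1 ++ pvCrep k v (t.drop (kv'.1.length - 1)) := by
                  rw [hZdef]
                  exact List.isPrefixOf_iff_prefix.mp hapf
                have haM : a ∈ M := by rw [hMsplit]; exact List.mem_append_left _ ha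
                have hfa := hM₁ a ha
                simp only [Bool.not_eq_eq_eq_not, Bool.not_true, Bool.and_eq_false_iff] at hfa
                rcases hfa with hfa | hfa
                · exact hane' (by simpa using hfa)
                · rcases Nat.lt_or_ge kv'.1.length a.1.length with hl | hl
                  · have hpp : kv'.1 <+: a.1 :=
                      List.prefix_of_prefix_length_le (List.prefix_append _ _) hapre (by omega)
                    exact absurd hpp.isInfix
                      (pvSep_not_infix (hMM kv' hkv'M a haM)
                        (by intro he; rw [he] at hl; omega))
                  · have hp1 : a.1 <+: kv'.1 :=
                      List.prefix_of_prefix_length_le hapre (List.prefix_append _ _) hl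
                    have hp2 : a.1 <+: (c :: t) := hp1.trans hkv'pre
                    exact absurd (List.isPrefixOf_iff_prefix.mpr hp2) (by simp [hfa])
          rw [pvScan_cons_pos hfind2]
          congr 1
          have hxs : xs.length = kv'.1.length - 1 := by rw [hkv1]; simp
          rw [show (xs ++ pvCrep k v (t.drop (kv'.1.length - 1))).drop (kv'.1.length - 1)
              = pvCrep k v (t.drop (kv'.1.length - 1)) from by rw [← hxs, List.drop_left]]
        rw [hscan2]
        congr 1
        exact ih (t.drop (kv'.1.length - 1))
          (by simp only [List.length_cons, List.length_drop]; omega)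

-- the mapping-building fold only appends fresh keys
theorem pvBuildShape (s : List Char) :
    ∀ (keys : List (List Char)) (m : List (List Char × List Char)) (c : Int),
      ∃ R, (keys.foldl (pvStepB s) (m, c)).1 = m ++ R ∧
        (∀ kv ∈ R, (kv.1 ∈ keys ∧ PySem.Chars.isIn kv.1 s = true) ∧ m.lookup kv.1 = none) := by
  intro keys
  induction keys with
  | nil => intro m c; exact ⟨[], by simp, by simp⟩
  | cons k rest ih =>
    intro m c
    simp only [List.foldl_cons]
    by_cases hg : ((m.lookup k).isNone && PySem.Chars.isIn k s) = true
    · rw [show pvStepB s (m, c) k = (m ++ [(k, 'T' :: PySem.Int.toChars c)], c + 1) from by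
        unfold pvStepB; rw [if_pos hg]]
      obtain ⟨R, hR, hRP⟩ := ih (m ++ [(k, 'T' :: PySem.Int.toChars c)]) (c + 1)
      refine ⟨(k, 'T' :: PySem.Int.toChars c) :: R, by rw [hR]; simp, ?_⟩
      intro kv hkv
      rcases List.mem_cons.mp hkv with h | h
      · subst h
        simp only [Bool.and_eq_true, Option.isNone_iff_eq_none] at hg
        exact ⟨⟨by simp, hg.2⟩, hg.1⟩
      · have := hRP kv h
        refine ⟨⟨by simp [this.1.1], this.1.2⟩, ?_⟩
        have hl := this.2
        rw [List.lookup_append] at hl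
        rcases hm : m.lookup kv.1 with _ | w
        · rfl
        · rw [hm] at hl; simp [Option.or] at hl
    · rw [show pvStepB s (m, c) k = (m, c) from by unfold pvStepB; rw [if_neg hg]]
      obtain ⟨R, hR, hRP⟩ := ih m c
      exact ⟨R, hR, fun kv hkv =>
        ⟨⟨by simp [(hRP kv hkv).1.1], (hRP kv hkv).1.2⟩, (hRP kv hkv).2⟩⟩

-- the mapping build only looks at membership of each key; k's guard shields duplicates
theorem pvBuildCong {k s s' : List Char} :
    ∀ (rest : List (List Char)) (m : List (List Char × List Char)) (c : Int),
      (∀ kj ∈ rest, kj = k ∨ PySem.Chars.isIn kj s' = PySem.Chars.isIn kj s) →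
      (m.lookup k).isSome →
      rest.foldl (pvStepB s') (m, c) = rest.foldl (pvStepB s) (m, c) := by
  intro rest
  induction rest with
  | nil => intro m c _ _; rfl
  | cons kj rest ih =>
    intro m c hmem hk
    simp only [List.foldl_cons]
    rcases hmem kj (by simp) with he | he
    · subst he
      have h1 : pvStepB s' (m, c) kj = (m, c) := by
        unfold pvStepB
        rw [if_neg (by
          rintro hcon
          rw [Bool.and_eq_true, Option.isNone_iff_eq_none] at hcon
          rw [hcon.1] at hk
          simp at hk)]
      have h2 : pvStepB s (m, c) kj = (m, c) := by
        unfold pvStepB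
        rw [if_neg (by
          rintro hcon
          rw [Bool.and_eq_true, Option.isNone_iff_eq_none] at hcon
          rw [hcon.1] at hk
          simp at hk)]
      rw [h1, h2]
      exact ih m c (fun a ha => hmem a (by simp [ha])) hk
    · have hstep : pvStepB s' (m, c) kj = pvStepB s (m, c) kj := by
        unfold pvStepB
        rw [he]
      have hk2 : (((pvStepB s (m, c) kj).1).lookup k).isSome := by
        unfold pvStepB
        split
        · exact pv_lookup_append_isSome hk
        · exact hk
      rw [hstep]
      rcases hcase : pvStepB s (m, c) kj with ⟨m2, c2⟩
      rw [hcase] at hk2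
      exact ih m2 c2 (fun a ha => hmem a (by simp [ha])) hk2

-- sequential A equals mapping-then-scan B, by induction over the key list
theorem pvMain :
    ∀ (keys : List (List Char)) (m0 : List (List Char × List Char)) (s : List Char) (c : Int),
      (∀ a ∈ keys, pvGood a) →
      (∀ kv ∈ m0, pvGood kv.1) →
      (∀ a ∈ keys, PySem.Chars.isIn a s = true →
        ∀ b ∈ keys, PySem.Chars.isIn b s = true → pvSep a b) →
      1 ≤ c →
      (∀ kv ∈ m0, ¬ kv.1 <:+: s) →
      (keys.foldl pvStepA (s, c)).1 = pvScan ((keys.foldl (pvStepB s) (m0, c)).1) s := by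
  intro keys
  induction keys with
  | nil =>
    intro m0 s c _ _ _ _ hinv
    simp only [List.foldl_nil]
    exact (pv_scan_absent s hinv).symm
  | cons k rest ih =>
    intro m0 s c hK hK0 hS hc hinv
    simp only [List.foldl_cons]
    have hgk : pvGood k := hK k (by simp)
    by_cases hlook : (m0.lookup k).isNone = true
    · by_cases hin : PySem.Chars.isIn k s = true
      · -- the alias occurs: A replaces, B records the mapping entry
        have hkk : pvSep k k := hS k (by simp) hin k (by simp) hin
        have hgv : pvGoodVal ('T' :: PySem.Int.toChars c) := pv_goodVal_T hc
        have hstepA : pvStepA (s, c) k = (pvCrep k ('T' :: PySem.Int.toChars c) s, c + 1) := by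
          unfold pvStepA; rw [if_pos hin]
        have hstepB : pvStepB s (m0, c) k = (m0 ++ [(k, 'T' :: PySem.Int.toChars c)], c + 1) := by
          unfold pvStepB; rw [if_pos (by simp [hlook, hin])]
        rw [hstepA, hstepB]
        -- occurrences in the replaced string reflect to the original
        have hrefl : ∀ p, pvGood p → p <:+: pvCrep k ('T' :: PySem.Int.toChars c) s → p <:+: s :=
          fun p hgp h => pv_crep_infix_reflect hgp hgv s h
        have hinv' : ∀ kv ∈ m0 ++ [(k, 'T' :: PySem.Int.toChars c)],
            ¬ kv.1 <:+: pvCrep k ('T' :: PySem.Int.toChars c) s := by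
          intro kv hkv
          rcases List.mem_append.mp hkv with h | h
          · intro hinf
            exact hinv kv h (hrefl kv.1 (hK0 kv h) hinf)
          · rw [show kv = (k, 'T' :: PySem.Int.toChars c) from by simpa using h]
            exact pv_crep_kill hgk hgv hkk s
        have ihapp := ih (m0 ++ [(k, 'T' :: PySem.Int.toChars c)])
          (pvCrep k ('T' :: PySem.Int.toChars c) s) (c + 1)
          (fun a ha => hK a (by simp [ha]))
          (fun kv hkv => by
            rcases List.mem_append.mp hkv with h | h
            · exact hK0 kv h
            · rw [show kv = (k, 'T' :: PySem.Int.toChars c) from by simpa using h]; exact hgk)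
          (fun a ha hain b hb hbin => by
            refine hS a (by simp [ha]) ?_ b (by simp [hb]) ?_
            · exact (PySem.Chars.isIn_iff_infix ..).mpr
                (hrefl a (hK a (by simp [ha])) ((PySem.Chars.isIn_iff_infix ..).mp hain))
            · exact (PySem.Chars.isIn_iff_infix ..).mpr
                (hrefl b (hK b (by simp [hb])) ((PySem.Chars.isIn_iff_infix ..).mp hbin)))
          (by omega)
          hinv'
        rw [ihapp]
        have hcong : rest.foldl (pvStepB (pvCrep k ('T' :: PySem.Int.toChars c) s))
              (m0 ++ [(k, 'T' :: PySem.Int.toChars c)], c + 1)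
            = rest.foldl (pvStepB s) (m0 ++ [(k, 'T' :: PySem.Int.toChars c)], c + 1) := by
          refine pvBuildCong (k := k) rest _ _ ?_ ?_
          · intro kj hkj
            by_cases hkjk : kj = k
            · exact Or.inl hkjk
            · right
              have h1 := pv_crep_infix_reflect (k := k) (v := 'T' :: PySem.Int.toChars c)
                (hK kj (by simp [hkj])) hgv s
              cases hcs : PySem.Chars.isIn kj s with
              | true =>
                have h2 := pv_crep_infix_preserve (v := 'T' :: PySem.Int.toChars c) (p := kj)
                  (hK kj (by simp [hkj])) hgk hkjk
                  (hS kj (by simp [hkj]) hcs k (by simp) hin)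
                  (hS k (by simp) hin kj (by simp [hkj]) hcs) s
                exact (PySem.Chars.isIn_iff_infix ..).mpr
                  (h2 ((PySem.Chars.isIn_iff_infix ..).mp hcs))
              | false =>
                cases hcs' : PySem.Chars.isIn kj (pvCrep k ('T' :: PySem.Int.toChars c) s) with
                | false => rfl
                | true =>
                  have hx := (PySem.Chars.isIn_iff_infix ..).mpr
                    (h1 ((PySem.Chars.isIn_iff_infix ..).mp hcs'))
                  rw [hx] at hcs
                  exact absurd hcs (by simp)
          · rw [List.lookup_append, Option.isNone_iff_eq_none.mp hlook]
            simp [List.lookup]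
        rw [hcong]
        obtain ⟨R, hR, hRP⟩ := pvBuildShape s rest (m0 ++ [(k, 'T' :: PySem.Int.toChars c)]) (c + 1)
        rw [hR]
        have hRgood : ∀ kv ∈ R, pvGood kv.1 ∧ kv.1 ≠ k ∧ pvSep k kv.1 ∧ pvSep kv.1 k := by
          intro kv hkv
          have h1 := (hRP kv hkv).1.1
          have h1in := (hRP kv hkv).1.2
          have h2 := (hRP kv hkv).2
          have hkne : kv.1 ≠ k := by
            intro he
            rw [he, List.lookup_append, Option.isNone_iff_eq_none.mp hlook] at h2
            simp [List.lookup] at h2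
          exact ⟨hK kv.1 (by simp [h1]), hkne,
            hS k (by simp) hin kv.1 (by simp [h1]) h1in,
            hS kv.1 (by simp [h1]) h1in k (by simp) hin⟩
        have hRMM : ∀ kv ∈ R, ∀ kv' ∈ R, pvSep kv.1 kv'.1 := fun kv hkv kv' hkv' =>
          hS kv.1 (by simp [(hRP kv hkv).1.1]) (hRP kv hkv).1.2
            kv'.1 (by simp [(hRP kv' hkv').1.1]) (hRP kv' hkv').1.2
        have hassoc : (m0 ++ [(k, 'T' :: PySem.Int.toChars c)]) ++ R
            = m0 ++ ((k, 'T' :: PySem.Int.toChars c) :: R) := by simp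
        rw [hassoc]
        have hL : pvScan (m0 ++ ((k, 'T' :: PySem.Int.toChars c) :: R))
              (pvCrep k ('T' :: PySem.Int.toChars c) s)
            = pvScan R (pvCrep k ('T' :: PySem.Int.toChars c) s) := by
          rw [pv_scan_drop m0 (pvCrep k ('T' :: PySem.Int.toChars c) s)
            (fun kv hkv => hinv' kv (by simp [hkv]))]
          have h2 := pv_scan_erase (M₁ := []) (M₂ := R) (e := (k, 'T' :: PySem.Int.toChars c))
            (pvCrep k ('T' :: PySem.Int.toChars c) s)
            (pv_crep_kill hgk hgv hkk s)
          simpa using h2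
        have hRt : pvScan (m0 ++ ((k, 'T' :: PySem.Int.toChars c) :: R)) s
            = pvScan R (pvCrep k ('T' :: PySem.Int.toChars c) s) := by
          rw [pv_scan_drop m0 s hinv]
          exact pvCore hgk hgv hRgood hRMM s
        rw [hL, hRt]
      · -- the alias does not occur: both sides skip it
        have hstepA : pvStepA (s, c) k = (s, c) := by
          unfold pvStepA; rw [if_neg (by simp [Bool.not_eq_true] at hin ⊢; exact hin)]
        have hstepB : pvStepB s (m0, c) k = (m0, c) := by
          unfold pvStepB
          rw [if_neg (by rw [Bool.not_eq_true] at hin; simp [hin])]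
        rw [hstepA, hstepB]
        exact ih m0 s c (fun a ha => hK a (by simp [ha])) hK0
          (fun a ha hain b hb hbin => hS a (by simp [ha]) hain b (by simp [hb]) hbin) hc hinv
    · -- k is already mapped: its occurrences are gone, both sides skip it
      have hsome : (m0.lookup k).isSome := by
        rcases h : m0.lookup k with _ | x
        · rw [h] at hlook; simp at hlook
        · simp
      obtain ⟨x, hx⟩ := Option.isSome_iff_exists.mp hsome
      have habs := hinv (k, x) (pv_lookup_mem hx)
      have hin : PySem.Chars.isIn k s = false := by
        cases h : PySem.Chars.isIn k s with
        | false => rfl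
        | true => exact absurd ((PySem.Chars.isIn_iff_infix ..).mp h) habs
      have hstepA : pvStepA (s, c) k = (s, c) := by
        unfold pvStepA; rw [if_neg (by simp [hin])]
      have hstepB : pvStepB s (m0, c) k = (m0, c) := by
        unfold pvStepB; rw [if_neg (by simp [hin])]
      rw [hstepA, hstepB]
      exact ih m0 s c (fun a ha => hK a (by simp [ha])) hK0
        (fun a ha hain b hb hbin => hS a (by simp [ha]) hain b (by simp [hb]) hbin) hc hinv

-- ===== bridging the String-level port A to the char-level fold =====
def pvPhi (st : String × Int) : List Char × Int := (st.1.toList, st.2)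

def pvStepAS (st : String × Int) (key : String) : String × Int :=
  if PySem.Str.isIn key st.1 then
    (PySem.Str.replace st.1 key ("T" ++ PySem.Int.toStr st.2), st.2 + 1)
  else st

theorem pv_go_eq {old new : List Char} (hk : old ≠ []) :
    ∀ (fuel : Nat) (l acc : List Char), l.length ≤ fuel →
      PySem.Chars.replace.go old new fuel l acc = acc.reverse ++ pvCrep old new l := by
  intro fuel
  induction fuel with
  | zero =>
    intro l acc hl
    have : l = [] := by
      cases l with
      | nil => rfl
      | cons a b => simp at hl
    subst this
    simp [PySem.Chars.replace.go, pvCrep_nil]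
  | succ f ihf =>
    intro l acc hl
    cases l with
    | nil => simp [PySem.Chars.replace.go, pvCrep_nil]
    | cons c t =>
      rw [PySem.Chars.replace.go]
      by_cases hp : old.isPrefixOf (c :: t) = true
      · rw [if_pos hp]
        have hle : (List.drop old.length (c :: t)).length ≤ f := by
          simp only [List.length_drop, List.length_cons] at *
          have : 1 ≤ old.length := by
            cases old with
            | nil => exact absurd rfl hk
            | cons a b => simp
          omega
        rw [ihf _ _ hle]
        rw [pvCrep_cons_pos new hk hp]
        rw [show List.drop old.length (c :: t) = t.drop (old.length - 1) from
          (pv_drop_shift hk c t).symm ▸ rfl]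
        simp [pv_drop_shift hk c t]
      · rw [if_neg hp]
        rw [ihf _ _ (by simp at hl ⊢; omega)]
        rw [pvCrep_cons_neg new (by simpa using hp)]
        simp

theorem pv_replace_eq {old : List Char} (hk : old ≠ []) (s new : List Char) :
    PySem.Chars.replace s old new = pvCrep old new s := by
  rw [PySem.Chars.replace]
  rw [if_neg (by simpa using hk)]
  rw [pv_go_eq hk s.length s [] (le_refl _)]
  simp

theorem pvStepA_bridge (st : String × Int) (key : String) (hk : key.toList ≠ []) :
    pvPhi (pvStepAS st key) = pvStepA (pvPhi st) key.toList := by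
  unfold pvStepAS pvStepA pvPhi
  rw [PySem.Str.isIn_eq]
  by_cases h : PySem.Chars.isIn key.toList st.1.toList = true
  · rw [if_pos h, if_pos h]
    simp only [Prod.mk.injEq]
    refine ⟨?_, trivial⟩
    rw [PySem.Str.toList_replace]
    rw [pv_replace_eq hk]
    congr 1
    rw [String.toList_append, PySem.Int.toList_toStr]
    try rfl
  · rw [if_neg h, if_neg h]

theorem pv_foldA_keys :
    ∀ (ks : List String) (st : String × Int), (∀ key ∈ ks, key.toList ≠ []) →
      pvPhi (ks.foldl pvStepAS st) = (ks.map String.toList).foldl pvStepA (pvPhi st) := by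
  intro ks
  induction ks with
  | nil => intro st _; rfl
  | cons key ks ih =>
    intro st hne
    simp only [List.foldl_cons, List.map_cons]
    rw [ih (pvStepAS st key) (fun a ha => hne a (by simp [ha]))]
    rw [pvStepA_bridge st key (hne key (by simp))]

theorem pv_portA_foldAS (sql : String) (table_names : List String) :
    normalize_alias sql table_names
      = (((table_names ++ ["DERIVED_FIELD", "DERIVED_TABLE"]).flatMap
          (fun t => (["0", "1", "2", "3", "4", "5", "6"] : List String).map
            (fun idx => PySem.Str.upper t ++ "alias" ++ idx))).foldl pvStepAS (sql, 1)).1 := by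
  unfold normalize_alias
  rw [List.foldl_flatMap]
  congr 1

theorem pv_keys_toList (table_names : List String) :
    ((table_names ++ ["DERIVED_FIELD", "DERIVED_TABLE"]).flatMap
        (fun t => (["0", "1", "2", "3", "4", "5", "6"] : List String).map
          (fun idx => PySem.Str.upper t ++ "alias" ++ idx))).map String.toList
      = pvPreKeys table_names := by
  unfold pvPreKeys
  rw [List.map_flatMap]
  congr 1
  funext t
  rw [List.map_map]
  rw [show (["0", "1", "2", "3", "4", "5", "6"] : List String)
      = "0123456".toList.map (fun d => String.ofList [d]) from by decide]
  rw [List.map_map]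
  congr 1
  funext d
  simp only [Function.comp_apply]
  rw [String.toList_append, String.toList_append]
  congr 1
  simp

theorem pv_key_ne_nil (table_names : List String) :
    ∀ key ∈ (table_names ++ ["DERIVED_FIELD", "DERIVED_TABLE"]).flatMap
        (fun t => (["0", "1", "2", "3", "4", "5", "6"] : List String).map
          (fun idx => PySem.Str.upper t ++ "alias" ++ idx)), key.toList ≠ [] := by
  intro key hkey
  simp only [List.mem_flatMap, List.mem_map] at hkey
  obtain ⟨t, -, idx, -, rfl⟩ := hkey
  rw [String.toList_append, String.toList_append]
  simp

theorem pv_portA_chars (sql : String) (table_names : List String) :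
    (normalize_alias sql table_names).toList
      = ((pvPreKeys table_names).foldl pvStepA (sql.toList, 1)).1 := by
  rw [pv_portA_foldAS]
  have h := pv_foldA_keys _ (sql, 1) (pv_key_ne_nil table_names)
  rw [pv_keys_toList] at h
  exact congrArg Prod.fst h

theorem pv_portB_eq (sql : String) (table_names : List String) :
    normalize_alias_alt sql table_names
      = String.ofList (pvScan (((pvPreKeys table_names).foldl
          (pvStepB sql.toList) ([], 1)).1) sql.toList) := rfl

-- ===== VERDICT (by name: the statement is the Claim_ definition above) =====
-- when no alias occurs in sql at all, both programs leave sql unchanged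
theorem pv_foldA_noop :
    ∀ (keys : List (List Char)) (s : List Char) (c : Int),
      (∀ k ∈ keys, PySem.Chars.isIn k s = false) →
      keys.foldl pvStepA (s, c) = (s, c) := by
  intro keys
  induction keys with
  | nil => intro s c _; rfl
  | cons k rest ih =>
    intro s c h
    simp only [List.foldl_cons]
    rw [show pvStepA (s, c) k = (s, c) from by
      unfold pvStepA; rw [if_neg (by simp [h k (by simp)])]]
    exact ih s c (fun a ha => h a (by simp [ha]))

theorem pv_foldB_noop :
    ∀ (keys : List (List Char)) (s : List Char) (m : List (List Char × List Char)) (c : Int),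
      (∀ k ∈ keys, PySem.Chars.isIn k s = false) →
      keys.foldl (pvStepB s) (m, c) = (m, c) := by
  intro keys
  induction keys with
  | nil => intro s m c _; rfl
  | cons k rest ih =>
    intro s m c h
    simp only [List.foldl_cons]
    rw [show pvStepB s (m, c) k = (m, c) from by
      unfold pvStepB; rw [if_neg (by simp [h k (by simp)])]]
    exact ih s m c (fun a ha => h a (by simp [ha]))

theorem normalize_alias_spec : Claim_equal_normalize_alias := by
  intro sql table_names _ hpre
  unfold Spec_normalize_alias
  unfold Pre_normalize_alias at hpre
  simp only [Bool.and_eq_true, Bool.or_eq_true, Bool.not_eq_true', List.all_eq_true] at hpre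
  rcases hpre with hnone | ⟨hgood, hsep⟩
  · -- no alias occurs: both programs return sql unchanged
    have hA : (normalize_alias sql table_names).toList = sql.toList := by
      rw [pv_portA_chars, pv_foldA_noop _ _ _ (fun k hk => hnone k hk)]
    have hB : (normalize_alias_alt sql table_names).toList = sql.toList := by
      rw [pv_portB_eq, String.toList_ofList,
        pv_foldB_noop _ _ _ _ (fun k hk => hnone k hk)]
      exact pv_scan_absent sql.toList (by simp)
    calc normalize_alias sql table_names
        = String.ofList (normalize_alias sql table_names).toList := String.ofList_toList.symm
      _ = String.ofList (normalize_alias_alt sql table_names).toList := by rw [hA, hB]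
      _ = normalize_alias_alt sql table_names := String.ofList_toList
  have hmain := pvMain (pvPreKeys table_names) [] sql.toList 1
    (fun a ha => hgood a ha)
    (by simp)
    (fun a ha hain b hb hbin => by
      rcases hsep a ha with h | h
      · rw [h] at hain; exact absurd hain (by simp)
      · rcases h b hb with h' | h'
        · rw [h'] at hbin; exact absurd hbin (by simp)
        · exact h')
    (le_refl 1)
    (by simp)
  have hAB : (normalize_alias sql table_names).toList
      = (normalize_alias_alt sql table_names).toList := by
    rw [pv_portA_chars, pv_portB_eq, String.toList_ofList]
    exact hmain
  calc normalize_alias sql table_names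
      = String.ofList (normalize_alias sql table_names).toList := String.ofList_toList.symm
    _ = String.ofList (normalize_alias_alt sql table_names).toList := by rw [hAB]
    _ = normalize_alias_alt sql table_names := String.ofList_toList
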